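-- pv_equiv track=rewrite | github.com/0322203936-cmd/CFBC-WK | data_extractor.py | norm_ranch
-- ===== SOURCE A (Python) =====
-- RANCH_CONFIG = {
--     "Prop-RM":     {"color": "#047857", "codes": ["VIV"], "keywords": ["PROP"]},
--     "PosCo-RM":    {"color": "#1d4ed8", "codes": ["POS", "LIM"], "keywords": ["POSCO"]},
--     "Campo-RM":    {"color": "#b45309", "codes": ["CAM", "RAM"], "keywords": ["CAMPO"]},
--     "Isabela":     {"color": "#7c3aed", "codes": ["ISA"], "keywords": ["ISABEL"]},
--     "HOOPS":       {"color": "#c2410c", "codes": ["HOO"], "keywords": ["HOOPS"]},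
--     "Cecilia":     {"color": "#be185d", "codes": ["CEC"], "keywords": ["CECILIA"]},
--     "Cecilia 25":  {"color": "#047857", "codes": ["C25"], "keywords": ["CECILIA 25"]},
--     "Christina":   {"color": "#0369a1", "codes": ["CHR"], "keywords": ["CHRISTINA"]},
--     "Albahaca-RM": {"color": "#6d28d9", "codes": ["ALB"], "keywords": ["ALBAHACA"]},
--     "Campo-VI":    {"color": "#64748b", "codes": [], "keywords": ["CAMPO-VI", "CAMPO-IV"]}
-- }
--
-- def norm_ranch(s: str):
--     s = str(s).upper().strip()
--     if "CAMPO-VI" in s or "CAMPO-IV" in s:               return "Campo-VI"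
--     if "CECILIA 25" in s or "25 CECILIA" in s:           return "Cecilia 25"
--     if "CECILIA" in s and "25" not in s:                 return "Cecilia"
--     if "CAMPO" in s and "VI" not in s and "IV" not in s: return "Campo-RM"
--     if "CRISTINA" in s:                                  return "Christina"
--     if "PROPAGACION" in s:                               return "Prop-RM"
--
--     for ranch, data in RANCH_CONFIG.items():
--         if ranch in ["Campo-VI", "Cecilia 25", "Cecilia", "Campo-RM"]:
--             continue
--         for kw in data["keywords"]:
--             if kw in s:
--                 return ranch
--     return None
-- ===== SOURCE B (Python) =====
-- # Single-pass multi-pattern matcher: scan positions of t once, collecting every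
-- # keyword that occurs, then classify from the resulting match set.
-- KEYWORDS = ("CAMPO-VI", "CAMPO-IV", "CECILIA 25", "25 CECILIA", "CECILIA", "25",
--             "CAMPO", "VI", "IV", "CRISTINA", "PROPAGACION", "PROP", "POSCO",
--             "ISABEL", "HOOPS", "CHRISTINA", "ALBAHACA")
--
-- def norm_ranch(s: str):
--     t = str(s).upper().strip()
--     hits = set()
--     for i in range(len(t)):
--         for kw in KEYWORDS:
--             if t.startswith(kw, i):
--                 hits.add(kw)
--     if "CAMPO-VI" in hits or "CAMPO-IV" in hits:   return "Campo-VI"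
--     if "CECILIA 25" in hits or "25 CECILIA" in hits: return "Cecilia 25"
--     if "CECILIA" in hits and "25" not in hits:     return "Cecilia"
--     if "CAMPO" in hits and "VI" not in hits and "IV" not in hits: return "Campo-RM"
--     if "CRISTINA" in hits:    return "Christina"
--     if "PROPAGACION" in hits: return "Prop-RM"
--     if "PROP" in hits:        return "Prop-RM"
--     if "POSCO" in hits:       return "PosCo-RM"
--     if "ISABEL" in hits:      return "Isabela"
--     if "HOOPS" in hits:       return "HOOPS"
--     if "CHRISTINA" in hits:   return "Christina"
--     if "ALBAHACA" in hits:    return "Albahaca-RM"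
--     return None
-- ===== Notes on version B (the rewrite author's own statement) =====
-- stated objective: alternative
-- what changed: Replaces A's sequence of independent substring tests (if-chain plus a config-dict loop) by a single left-to-right scan over the string's positions that collects the set of all matched keywords at once, followed by a decision over that match set.
import Mathlib
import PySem

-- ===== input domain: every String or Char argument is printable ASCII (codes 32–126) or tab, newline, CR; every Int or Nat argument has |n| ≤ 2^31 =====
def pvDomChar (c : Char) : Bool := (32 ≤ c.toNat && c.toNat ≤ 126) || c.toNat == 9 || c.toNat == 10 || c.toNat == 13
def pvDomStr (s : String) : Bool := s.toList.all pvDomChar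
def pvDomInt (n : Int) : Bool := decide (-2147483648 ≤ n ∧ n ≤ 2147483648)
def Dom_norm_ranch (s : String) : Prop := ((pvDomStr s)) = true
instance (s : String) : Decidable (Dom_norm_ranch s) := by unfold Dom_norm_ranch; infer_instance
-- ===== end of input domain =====

-- B replaces A's independent substring tests by one position scan collecting a match set, then a decision over it (alternative).

-- ===== PORT A =====
-- RANCH_CONFIG restricted to the fields A reads: (ranch, keywords), in dict insertion order.
def ranchConfig : List (String × List String) :=
  [("Prop-RM", ["PROP"]), ("PosCo-RM", ["POSCO"]), ("Campo-RM", ["CAMPO"]),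
   ("Isabela", ["ISABEL"]), ("HOOPS", ["HOOPS"]), ("Cecilia", ["CECILIA"]),
   ("Cecilia 25", ["CECILIA 25"]), ("Christina", ["CHRISTINA"]),
   ("Albahaca-RM", ["ALBAHACA"]), ("Campo-VI", ["CAMPO-VI", "CAMPO-IV"])]

-- inner 'for kw in data["keywords"]' loop
def kwLoop (t : String) (ranch : String) : List String → Option String
  | [] => none
  | kw :: rest => if PySem.Str.isIn kw t then some ranch else kwLoop t ranch rest

-- outer 'for ranch, data in RANCH_CONFIG.items()' loop with its skip list
def configLoop (t : String) : List (String × List String) → Option String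
  | [] => none
  | (ranch, kws) :: rest =>
    if ranch ∈ ["Campo-VI", "Cecilia 25", "Cecilia", "Campo-RM"] then configLoop t rest
    else
      match kwLoop t ranch kws with
      | some r => some r
      | none => configLoop t rest

def norm_ranch (s : String) : Option String :=
  let t := PySem.Str.strip (PySem.Str.upper s)
  if PySem.Str.isIn "CAMPO-VI" t || PySem.Str.isIn "CAMPO-IV" t then some "Campo-VI"
  else if PySem.Str.isIn "CECILIA 25" t || PySem.Str.isIn "25 CECILIA" t then some "Cecilia 25"
  else if PySem.Str.isIn "CECILIA" t && !PySem.Str.isIn "25" t then some "Cecilia"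
  else if PySem.Str.isIn "CAMPO" t && !PySem.Str.isIn "VI" t && !PySem.Str.isIn "IV" t then some "Campo-RM"
  else if PySem.Str.isIn "CRISTINA" t then some "Christina"
  else if PySem.Str.isIn "PROPAGACION" t then some "Prop-RM"
  else configLoop t ranchConfig

-- ===== PORT B =====
def keywords : List String :=
  ["CAMPO-VI", "CAMPO-IV", "CECILIA 25", "25 CECILIA", "CECILIA", "25",
   "CAMPO", "VI", "IV", "CRISTINA", "PROPAGACION", "PROP", "POSCO",
   "ISABEL", "HOOPS", "CHRISTINA", "ALBAHACA"]

-- the inner 'for kw in KEYWORDS: if t.startswith(kw, i): hits.add(kw)' at one position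
def addHits (u : List Char) (h : PySem.Set String) : PySem.Set String :=
  keywords.foldl (fun h kw => if PySem.Chars.startswith u kw.toList then PySem.Set.add h kw else h) h

-- the position loop 'for i in range(len(t))': t.startswith(kw, i) is exactly "kw is a prefix of
-- the suffix t[i:]", so the scan recurses over the suffixes of t (the empty suffix matches nothing).
def scan : List Char → PySem.Set String
  | [] => PySem.Set.empty
  | c :: rest => addHits (c :: rest) (scan rest)

def norm_ranch_alt (s : String) : Option String :=
  let t := PySem.Str.strip (PySem.Str.upper s)
  let hits := scan t.toList
  if PySem.Set.contains hits "CAMPO-VI" || PySem.Set.contains hits "CAMPO-IV" then some "Campo-VI"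
  else if PySem.Set.contains hits "CECILIA 25" || PySem.Set.contains hits "25 CECILIA" then some "Cecilia 25"
  else if PySem.Set.contains hits "CECILIA" && !PySem.Set.contains hits "25" then some "Cecilia"
  else if PySem.Set.contains hits "CAMPO" && !PySem.Set.contains hits "VI" && !PySem.Set.contains hits "IV" then some "Campo-RM"
  else if PySem.Set.contains hits "CRISTINA" then some "Christina"
  else if PySem.Set.contains hits "PROPAGACION" then some "Prop-RM"
  else if PySem.Set.contains hits "PROP" then some "Prop-RM"
  else if PySem.Set.contains hits "POSCO" then some "PosCo-RM"
  else if PySem.Set.contains hits "ISABEL" then some "Isabela"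
  else if PySem.Set.contains hits "HOOPS" then some "HOOPS"
  else if PySem.Set.contains hits "CHRISTINA" then some "Christina"
  else if PySem.Set.contains hits "ALBAHACA" then some "Albahaca-RM"
  else none

-- ===== PRECONDITION & SPEC =====
def Spec_norm_ranch (s : String) (out : Option String) : Prop := out = norm_ranch_alt s
instance (s : String) (out : Option String) : Decidable (Spec_norm_ranch s out) := by unfold Spec_norm_ranch; infer_instance

-- ===== CLAIM (what is proved, stated in full; the proofs are below) =====
def Claim_equal_norm_ranch : Prop := ∀ (s : String), Dom_norm_ranch s → Spec_norm_ranch s (norm_ranch s)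

-- ===== LEMMAS AND PROOFS =====

-- membership in the conditional-add fold of addHits
theorem mem_foldl_addIf (l : List String) (p : String → Bool) (s : PySem.Set String) (y : String) :
    y ∈ l.foldl (fun h kw => if p kw then PySem.Set.add h kw else h) s ↔
      y ∈ s ∨ (y ∈ l ∧ p y = true) := by
  induction l generalizing s with
  | nil => simp
  | cons a l ih =>
    simp only [List.foldl_cons, ih, List.mem_cons]
    by_cases ha : p a = true
    · simp only [ha, if_pos]
      rw [PySem.Set.mem_add]
      constructor
      · rintro ((h | h) | h)
        · exact Or.inl h
        · subst h; exact Or.inr ⟨Or.inl rfl, ha⟩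
        · exact Or.inr ⟨Or.inr h.1, h.2⟩
      · rintro (h | ⟨(h | h), hp⟩)
        · exact Or.inl (Or.inl h)
        · subst h; exact Or.inl (Or.inr rfl)
        · exact Or.inr ⟨h, hp⟩
    · simp only [if_neg ha]
      constructor
      · rintro (h | h)
        · exact Or.inl h
        · exact Or.inr ⟨Or.inr h.1, h.2⟩
      · rintro (h | ⟨(h | h), hp⟩)
        · exact Or.inl h
        · exact absurd (h ▸ hp) ha
        · exact Or.inr ⟨h, hp⟩

theorem mem_scan (y : String) (hy : y.toList ≠ []) (u : List Char) :
    y ∈ scan u ↔ y ∈ keywords ∧ y.toList <:+: u := by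
  induction u with
  | nil => simp [scan, PySem.Set.empty, List.infix_nil, hy]
  | cons c rest ih =>
    rw [scan]
    unfold addHits
    rw [mem_foldl_addIf, ih]
    simp only [List.infix_cons_iff, PySem.Chars.startswith_iff]
    tauto

theorem contains_scan (t : String) (kw : String) (hk : kw ∈ keywords) (hne : kw.toList ≠ []) :
    PySem.Set.contains (scan t.toList) kw = PySem.Str.isIn kw t := by
  rw [Bool.eq_iff_iff, PySem.Set.contains_iff, PySem.Str.isIn_iff_infix, mem_scan kw hne]
  exact and_iff_right hk

theorem match_if_opt (c : Prop) [Decidable c] (r : String) (e : Option String) :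
    (match (if c then some r else none) with
     | some x => some x
     | none => e) = if c then some r else e := by
  split_ifs <;> rfl

-- the config-dict loop of A, unfolded to the surviving (non-skipped) keyword tests in order
theorem configLoop_eq (t : String) :
    configLoop t ranchConfig =
      (if PySem.Str.isIn "PROP" t then some "Prop-RM"
       else if PySem.Str.isIn "POSCO" t then some "PosCo-RM"
       else if PySem.Str.isIn "ISABEL" t then some "Isabela"
       else if PySem.Str.isIn "HOOPS" t then some "HOOPS"
       else if PySem.Str.isIn "CHRISTINA" t then some "Christina"
       else if PySem.Str.isIn "ALBAHACA" t then some "Albahaca-RM"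
       else none) := by
  simp only [ranchConfig, configLoop, kwLoop, List.mem_cons, List.not_mem_nil, or_false,
    String.reduceEq, if_true, if_false, or_true, or_self, match_if_opt]

theorem norm_ranch_spec : Claim_equal_norm_ranch := by
  intro s _
  show norm_ranch s = norm_ranch_alt s
  simp only [norm_ranch, norm_ranch_alt]
  rw [configLoop_eq,
      contains_scan _ "CAMPO-VI" (by decide) (by decide),
      contains_scan _ "CAMPO-IV" (by decide) (by decide),
      contains_scan _ "CECILIA 25" (by decide) (by decide),
      contains_scan _ "25 CECILIA" (by decide) (by decide),
      contains_scan _ "CECILIA" (by decide) (by decide),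
      contains_scan _ "25" (by decide) (by decide),
      contains_scan _ "CAMPO" (by decide) (by decide),
      contains_scan _ "VI" (by decide) (by decide),
      contains_scan _ "IV" (by decide) (by decide),
      contains_scan _ "CRISTINA" (by decide) (by decide),
      contains_scan _ "PROPAGACION" (by decide) (by decide),
      contains_scan _ "PROP" (by decide) (by decide),
      contains_scan _ "POSCO" (by decide) (by decide),
      contains_scan _ "ISABEL" (by decide) (by decide),
      contains_scan _ "HOOPS" (by decide) (by decide),
      contains_scan _ "CHRISTINA" (by decide) (by decide),
      contains_scan _ "ALBAHACA" (by decide) (by decide)]
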